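-- pv_equiv track=rewrite | github.com/d4g10ur0s/GO_Sim_Util | EdgeBasedSimilarity/edgeBasedMethods.py | minimumPathLength
-- ===== SOURCE A (Python) =====
-- def minimumPathLength(t1 , t2):
--     if not(t1[1] == t2[1]):
--         return 0
--     dist_1 = 0
--     dist_2 = 0
--     # 1. for each layer of t1
--     for i in t1[0]:
--         # 2. for each layer of t2
--         for j in t2[0]:
--             intersection=list(set(t1[0][i])&set(t2[0][j]))
--             if len(intersection)>0:
--                 dist_1 = i
--                 dist_2 = j
--                 break
--             else:
--                 continue
--         #endfor
--     #endfor
--     return dist_1 + dist_2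
-- ===== SOURCE B (Python) =====
-- def minimumPathLength(t1, t2):
--     if t1[1] != t2[1]:
--         return 0
--     # index each node by the position of the first t2 layer containing it
--     first = {}
--     keys = []
--     for p, (j, nodes) in enumerate(t2[0].items()):
--         keys.append(j)
--         for x in nodes:
--             first.setdefault(x, p)
--     ans1 = ans2 = 0
--     # one pass over t1's layers: the first matching t2 layer is the one of
--     # minimal indexed position among this layer's nodes; the last layer with
--     # any match wins
--     for i, nodes in t1[0].items():
--         ps = [first[x] for x in nodes if x in first]
--         if ps:
--             ans1, ans2 = i, keys[min(ps)]
--     return ans1 + ans2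
-- ===== Notes on version B (the rewrite author's own statement) =====
-- stated objective: alternative
-- what changed: replaces the nested layer-by-layer set-intersection scan with a node->first-t2-layer index built once, so each t1 layer finds its first matching t2 layer by a minimum over its own nodes
import Mathlib
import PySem

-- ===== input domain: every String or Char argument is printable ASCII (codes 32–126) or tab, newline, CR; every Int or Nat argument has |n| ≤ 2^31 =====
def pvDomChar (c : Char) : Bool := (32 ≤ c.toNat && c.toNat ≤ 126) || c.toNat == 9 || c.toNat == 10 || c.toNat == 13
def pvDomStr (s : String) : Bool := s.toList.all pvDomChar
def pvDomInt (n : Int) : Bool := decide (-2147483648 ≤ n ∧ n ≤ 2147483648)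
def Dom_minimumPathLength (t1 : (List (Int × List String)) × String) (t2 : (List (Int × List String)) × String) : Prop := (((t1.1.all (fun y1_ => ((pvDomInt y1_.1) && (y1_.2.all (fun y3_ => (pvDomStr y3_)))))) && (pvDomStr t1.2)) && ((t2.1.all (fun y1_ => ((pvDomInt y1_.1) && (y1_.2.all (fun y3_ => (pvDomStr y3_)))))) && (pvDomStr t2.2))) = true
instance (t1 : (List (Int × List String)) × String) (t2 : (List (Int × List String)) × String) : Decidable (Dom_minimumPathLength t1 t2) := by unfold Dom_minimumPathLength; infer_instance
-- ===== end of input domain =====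

-- B replaces A's nested layer-by-layer set-intersection scan with a node -> first-t2-layer
-- index built once, then one pass over t1's layers (objective: alternative algorithm).

-- ===== PORT A =====
def pvIntersects (vi vj : List String) : Bool :=
  0 < (PySem.Set.inter (PySem.Set.ofList vi) (PySem.Set.ofList vj)).length

def pvInnerA (vi : List String) (d2 : PySem.Dict Int (List String)) : List Int → Option Int
  | [] => none
  | j :: rest => if pvIntersects vi (d2.getD j []) then some j else pvInnerA vi d2 rest

def minimumPathLength (t1 : (List (Int × List String)) × String) (t2 : (List (Int × List String)) × String) : Int :=
  if !(t1.2 == t2.2) then 0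
  else
    let d1 := PySem.Dict.ofList t1.1
    let d2 := PySem.Dict.ofList t2.1
    let st := d1.keys.foldl (fun (st : Int × Int) i =>
        match pvInnerA (d1.getD i []) d2 d2.keys with
        | some j => (i, j)
        | none => st) (0, 0)
    st.1 + st.2


-- ===== PORT B =====
def pvIndexB (items : List (Int × List String)) : PySem.Dict String Int × List Int :=
  (PySem.List.enumerate items 0).foldl
    (fun acc pe =>
      (pe.2.2.foldl (fun f x => f.setdefault x pe.1) acc.1, acc.2 ++ [pe.2.1]))
    (PySem.Dict.empty, [])

def minimumPathLength_alt (t1 : (List (Int × List String)) × String) (t2 : (List (Int × List String)) × String) : Int :=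
  if t1.2 != t2.2 then 0
  else
    let idx := pvIndexB (PySem.Dict.ofList t2.1).items
    let st := (PySem.Dict.ofList t1.1).items.foldl
      (fun (st : Int × Int) iv =>
        let ps := iv.2.filterMap (fun x => idx.1.get? x)
        match PySem.List.min? ps (fun q => q) with
        | none => st
        | some p => (iv.1, PySem.List.pyGetD idx.2 p 0)) (0, 0)
    st.1 + st.2


-- ===== PRECONDITION & SPEC =====
def Spec_minimumPathLength (t1 : (List (Int × List String)) × String) (t2 : (List (Int × List String)) × String) (out : Int) : Prop := out = minimumPathLength_alt t1 t2
instance (t1 : (List (Int × List String)) × String) (t2 : (List (Int × List String)) × String) (out : Int) : Decidable (Spec_minimumPathLength t1 t2 out) := by unfold Spec_minimumPathLength; infer_instance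

-- ===== CLAIM (what is proved, stated in full; the proofs are below) =====
def Claim_equal_minimumPathLength : Prop := ∀ (t1 : (List (Int × List String)) × String) (t2 : (List (Int × List String)) × String), Dom_minimumPathLength t1 t2 → Spec_minimumPathLength t1 t2 (minimumPathLength t1 t2)

-- ===== LEMMAS AND PROOFS =====

def pvFL (x : String) : List (Int × List String) → Option Int
  | [] => none
  | (_, vs) :: rest => if x ∈ vs then some 0 else (pvFL x rest).map (· + 1)

def pvScan (vi : List String) : List (Int × List String) → Option Int
  | [] => none
  | (j, vs) :: rest => if pvIntersects vi vs then some j else pvScan vi rest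

theorem pvIntersects_iff (vi vj : List String) : pvIntersects vi vj = true ↔ ∃ x ∈ vi, x ∈ vj := by
  unfold pvIntersects
  simp only [decide_eq_true_eq, List.length_pos_iff]
  constructor
  · intro h
    obtain ⟨x, hx⟩ := List.exists_mem_of_ne_nil _ h
    have := (PySem.Set.mem_inter _ _ _).1 hx
    exact ⟨x, (PySem.Set.mem_ofList _ _).1 this.1, (PySem.Set.mem_ofList _ _).1 this.2⟩
  · rintro ⟨x, h1, h2⟩ hemp
    have : x ∈ PySem.Set.inter (PySem.Set.ofList vi) (PySem.Set.ofList vj) := by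
      rw [PySem.Set.mem_inter]
      exact ⟨(PySem.Set.mem_ofList _ _).2 h1, (PySem.Set.mem_ofList _ _).2 h2⟩
    simp [hemp] at this

theorem pvFL_nonneg (x : String) : ∀ (L : List (Int × List String)) (q : Int), pvFL x L = some q → 0 ≤ q := by
  intro L
  induction L with
  | nil => simp [pvFL]
  | cons h t ih =>
    intro q
    obtain ⟨j, vs⟩ := h
    simp only [pvFL]
    by_cases hx : x ∈ vs
    · simp [hx]; omega
    · simp only [hx, if_false]
      cases hFL : pvFL x t with
      | none => simp
      | some r => have := ih r hFL; simp; omega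

theorem pvSd_fold (vs : List String) (f : PySem.Dict String Int) (p : Int) (x : String) :
    ((vs.foldl (fun f y => f.setdefault y p) f).get? x)
      = (f.get? x).or (if x ∈ vs then some p else none) := by
  induction vs generalizing f with
  | nil => cases h : f.get? x <;> simp [h]
  | cons y t ih =>
    simp only [List.foldl_cons, ih]
    by_cases hxy : x = y
    · subst hxy
      rw [PySem.Dict.get?_setdefault_self]
      cases h : f.get? x <;> simp [h]
    · rw [PySem.Dict.get?_setdefault_of_ne _ _ hxy]
      by_cases hxt : x ∈ t <;> simp [hxt, hxy]

theorem pvIdx_snd (L : List (Int × List String)) : ∀ (p0 : Int) (f0 : PySem.Dict String Int) (ks0 : List Int),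
    (((PySem.List.enumerate L p0).foldl
      (fun acc pe => (pe.2.2.foldl (fun f x => f.setdefault x pe.1) acc.1, acc.2 ++ [pe.2.1]))
      (f0, ks0)).2) = ks0 ++ L.map Prod.fst := by
  induction L with
  | nil => simp [PySem.List.enumerate_nil]
  | cons h t ih =>
    intro p0 f0 ks0
    rw [PySem.List.enumerate_cons]
    simp only [List.foldl_cons, ih]
    simp

theorem pvIdx_get? (L : List (Int × List String)) : ∀ (p0 : Int) (f0 : PySem.Dict String Int) (ks0 : List Int) (x : String),
    (((PySem.List.enumerate L p0).foldl
      (fun acc pe => (pe.2.2.foldl (fun f x => f.setdefault x pe.1) acc.1, acc.2 ++ [pe.2.1]))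
      (f0, ks0)).1.get? x) = (f0.get? x).or ((pvFL x L).map (fun q => p0 + q)) := by
  induction L with
  | nil => intro p0 f0 ks0 x; cases h : f0.get? x <;> simp [PySem.List.enumerate_nil, pvFL, h]
  | cons hd t ih =>
    intro p0 f0 ks0 x
    obtain ⟨j, vs⟩ := hd
    rw [PySem.List.enumerate_cons]
    simp only [List.foldl_cons, ih, pvSd_fold, pvFL]
    by_cases hx : x ∈ vs
    · cases h : f0.get? x <;> simp [hx, h]
    · simp only [hx, if_false]
      cases h : f0.get? x with
      | some v => simp [h]
      | none =>
        cases hFL : pvFL x t <;> simp [h, hFL] <;> omega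

theorem pvFoldlMin_add_one (t : List Int) : ∀ (a : Int), (t.map (· + 1)).foldl min (a + 1) = t.foldl min a + 1 := by
  induction t with
  | nil => simp
  | cons y s ih =>
    intro a
    simp only [List.map_cons, List.foldl_cons]
    have : min (a + 1) (y + 1) = min a y + 1 := by omega
    rw [this, ih]

theorem pvMin?_map_add_one (l : List Int) :
    (PySem.List.min? (l.map (· + 1)) (fun q => q)) = (PySem.List.min? l (fun q => q)).map (· + 1) := by
  cases l with
  | nil => rw [(PySem.List.min?_eq_none_iff ([] : List Int) _).2 rfl]; rfl
  | cons a t => simp [PySem.List.min?_id_cons, pvFoldlMin_add_one]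

theorem pvMin?_eq_zero (l : List Int) (h0 : (0:Int) ∈ l) (hnn : ∀ y ∈ l, 0 ≤ y) :
    PySem.List.min? l (fun q => q) = some 0 := by
  cases hm : PySem.List.min? l (fun q => q) with
  | none => rw [PySem.List.min?_eq_none_iff] at hm; simp [hm] at h0
  | some m =>
    have h1 := PySem.List.min?_isMin hm 0 h0
    have h2 := hnn m (PySem.List.min?_mem hm)
    simp at h1 ⊢
    omega

theorem pvPyGetD_cons_succ (a : Int) (l : List Int) (q : Int) (hq : 0 ≤ q) :
    PySem.List.pyGetD (a :: l) (q + 1) 0 = PySem.List.pyGetD l q 0 := by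
  obtain ⟨n, rfl⟩ := Int.eq_ofNat_of_zero_le hq
  have : ((n : Int) + 1) = ((n + 1 : Nat) : Int) := by push_cast; ring
  rw [this, PySem.List.pyGetD_natCast, PySem.List.pyGetD_natCast]
  simp

theorem pvScan_eq_min (vi : List String) : ∀ (L : List (Int × List String)),
    pvScan vi L = (PySem.List.min? (vi.filterMap (fun x => pvFL x L)) (fun q => q)).map
      (fun p => PySem.List.pyGetD (L.map Prod.fst) p 0) := by
  intro L
  induction L with
  | nil =>
    simp [pvScan, pvFL, PySem.List.min?_eq_none_iff]
  | cons hd rest ih =>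
    obtain ⟨j, vs⟩ := hd
    simp only [pvScan, pvFL]
    by_cases hI : pvIntersects vi vs
    · obtain ⟨x, hxvi, hxvs⟩ := (pvIntersects_iff vi vs).1 hI
      have h0 : (0:Int) ∈ vi.filterMap (fun x => if x ∈ vs then some 0 else (pvFL x rest).map (· + 1)) := by
        rw [List.mem_filterMap]; exact ⟨x, hxvi, by simp [hxvs]⟩
      have hnn : ∀ y ∈ vi.filterMap (fun x => if x ∈ vs then some 0 else (pvFL x rest).map (· + 1)), (0:Int) ≤ y := by
        intro y hy
        rw [List.mem_filterMap] at hy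
        obtain ⟨z, hz, hzy⟩ := hy
        by_cases hzvs : z ∈ vs
        · simp [hzvs] at hzy; omega
        · simp [hzvs] at hzy
          obtain ⟨r, hr, rfl⟩ := hzy
          have := pvFL_nonneg z rest r hr
          omega
      rw [pvMin?_eq_zero _ h0 hnn]
      simp [hI, PySem.List.pyGetD_ofNat']
    · have hdisj : ∀ z ∈ vi, z ∉ vs := by
        intro z hz hzvs
        exact hI ((pvIntersects_iff vi vs).2 ⟨z, hz, hzvs⟩)
      have hcongr : vi.filterMap (fun x => if x ∈ vs then some 0 else (pvFL x rest).map (· + 1))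
          = (vi.filterMap (fun x => pvFL x rest)).map (· + 1) := by
        rw [List.map_filterMap]
        exact List.filterMap_congr (fun z hz => by simp [hdisj z hz])
      rw [if_neg hI, hcongr, pvMin?_map_add_one, Option.map_map, ih]
      cases hm : PySem.List.min? (vi.filterMap (fun x => pvFL x rest)) (fun q => q) with
      | none => rfl
      | some q =>
        have hq : 0 ≤ q := by
          have := PySem.List.min?_mem hm
          rw [List.mem_filterMap] at this
          obtain ⟨z, _, hz⟩ := this
          exact pvFL_nonneg z rest q hz
        simp only [Option.map_some, Function.comp]
        rw [List.map_cons, pvPyGetD_cons_succ _ _ _ hq]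

theorem pvInnerA_eq_scan (vi : List String) (d2 : PySem.Dict Int (List String)) (hn : d2.keys.Nodup) :
    ∀ (s : List (Int × List String)), (∀ p ∈ s, p ∈ d2.items) →
      pvInnerA vi d2 (s.map Prod.fst) = pvScan vi s := by
  intro s
  induction s with
  | nil => intro _; rfl
  | cons hd t ih =>
    intro hmem
    obtain ⟨j, vj⟩ := hd
    have hget : d2.getD j [] = vj :=
      PySem.Dict.getD_of_mem_items d2 (hmem (j, vj) (by simp)) hn []
    simp only [List.map_cons, pvInnerA, pvScan, hget]
    rw [ih (fun p hp => hmem p (by simp [hp]))]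

theorem pv_main (t1 : (List (Int × List String)) × String) (t2 : (List (Int × List String)) × String) :
    minimumPathLength t1 t2 = minimumPathLength_alt t1 t2 := by
  unfold minimumPathLength minimumPathLength_alt
  by_cases hr : (t1.2 == t2.2) = true
  · rw [if_neg (by simp [hr]), if_neg (by simp [bne, hr])]
    simp only []
    have hkeys2 : (PySem.Dict.ofList t2.1).keys = (PySem.Dict.ofList t2.1).items.map Prod.fst := by
      simp only [PySem.Dict.keys]
    have hidx2 : (pvIndexB (PySem.Dict.ofList t2.1).items).2 = (PySem.Dict.ofList t2.1).items.map Prod.fst := by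
      unfold pvIndexB; rw [pvIdx_snd]; simp
    have hidx1 : ∀ x, (pvIndexB (PySem.Dict.ofList t2.1).items).1.get? x = pvFL x (PySem.Dict.ofList t2.1).items := by
      intro x
      unfold pvIndexB
      rw [pvIdx_get?, PySem.Dict.get?_empty]
      cases h : pvFL x (PySem.Dict.ofList t2.1).items <;> simp [h]
    have hkeys1 : (PySem.Dict.ofList t1.1).keys = (PySem.Dict.ofList t1.1).items.map Prod.fst := by
      simp only [PySem.Dict.keys]
    rw [hkeys1, List.foldl_map]
    have hfold : ((PySem.Dict.ofList t1.1).items.foldl (fun (st : Int × Int) x =>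
        match pvInnerA ((PySem.Dict.ofList t1.1).getD x.1 []) (PySem.Dict.ofList t2.1) (PySem.Dict.ofList t2.1).keys with
        | some j => (x.1, j)
        | none => st) ((0:Int), (0:Int)))
        = ((PySem.Dict.ofList t1.1).items.foldl (fun (st : Int × Int) iv =>
        match PySem.List.min? (iv.2.filterMap (fun x => (pvIndexB (PySem.Dict.ofList t2.1).items).1.get? x)) (fun q => q) with
        | none => st
        | some p => (iv.1, PySem.List.pyGetD (pvIndexB (PySem.Dict.ofList t2.1).items).2 p 0)) ((0:Int), (0:Int))) := by
      apply PySem.List.foldl_congr_mem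
      intro acc iv hiv
      have hgd : (PySem.Dict.ofList t1.1).getD iv.1 [] = iv.2 :=
        PySem.Dict.getD_of_mem_items _ (by exact hiv) (PySem.Dict.nodup_keys_ofList t1.1) []
      rw [hgd, hkeys2,
        pvInnerA_eq_scan iv.2 _ (PySem.Dict.nodup_keys_ofList t2.1) _ (fun p hp => hp),
        pvScan_eq_min]
      have hfm : iv.2.filterMap (fun x => pvFL x (PySem.Dict.ofList t2.1).items)
          = iv.2.filterMap (fun x => (pvIndexB (PySem.Dict.ofList t2.1).items).1.get? x) :=
        List.filterMap_congr (fun x _ => (hidx1 x).symm)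
      rw [hfm, hidx2]
      cases PySem.List.min? (iv.2.filterMap (fun x => (pvIndexB (PySem.Dict.ofList t2.1).items).1.get? x)) (fun q => q) <;> rfl
    rw [hfold]
  · rw [if_pos (by simp [hr]), if_pos (by simp [bne, hr])]

-- ===== VERDICT (by name: the statement is the Claim_ definition above) =====
theorem minimumPathLength_spec : Claim_equal_minimumPathLength := by
  intro t1 t2 _
  unfold Spec_minimumPathLength
  exact pv_main t1 t2
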